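-- pv_equiv track=rewrite | github.com/Sangioo/Ingegneria-Infomatica | Introduzione-alla-programmazione/Simulazioni/CompitoB-gennaio/Soluzioni/Ex1.py | Ex1
-- ===== SOURCE A (Python) =====
-- def Ex1(l):
--     if len(l) == 0:
--         return 0
--     massimo = 1
--     conta = 1
--     for i in range(len(l)-1):
--         if l[i][1] == l[i+1][0]:
--             conta += 1
--         else:
--             conta = 1
--         if conta > massimo:
--             massimo = conta
--     return massimo
-- ===== SOURCE B (Python) =====
-- def Ex1(l):
--     if not l:
--         return 0
--     n = len(l)
--     # positions where the chain breaks
--     breaks = [i for i in range(n - 1) if l[i][1] != l[i + 1][0]]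
--     # sentinel points; each chained segment is a gap between consecutive points
--     pts = [-1] + breaks + [n - 1]
--     return max(pts[j + 1] - pts[j] for j in range(len(pts) - 1))
-- ===== Notes on version B (the rewrite author's own statement) =====
-- stated objective: alternative
-- what changed: Replaces A's fused running-counter/maximum loop with a two-phase computation: first collect the indices where the chain breaks (tail != next head), then return the maximum gap between consecutive break positions (with sentinels -1 and n-1).
import Mathlib
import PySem

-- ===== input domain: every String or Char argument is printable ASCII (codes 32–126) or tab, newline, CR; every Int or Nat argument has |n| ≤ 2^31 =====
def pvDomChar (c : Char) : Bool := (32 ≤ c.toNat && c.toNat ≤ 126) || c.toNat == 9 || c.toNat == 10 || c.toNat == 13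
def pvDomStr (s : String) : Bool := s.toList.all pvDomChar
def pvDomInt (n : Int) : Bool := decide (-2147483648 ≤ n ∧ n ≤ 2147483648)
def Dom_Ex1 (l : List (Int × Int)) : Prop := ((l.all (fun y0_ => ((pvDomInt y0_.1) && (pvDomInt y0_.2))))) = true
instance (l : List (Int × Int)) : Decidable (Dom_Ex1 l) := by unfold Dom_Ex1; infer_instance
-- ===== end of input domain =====

-- B replaces A's fused running-counter/maximum loop by a two-phase computation
-- (collect chain-break indices, then take the maximum gap between consecutive
-- break positions with sentinels); an alternative decomposition, not faster.

-- ===== PORT A =====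
def Ex1 (l : List (Int × Int)) : Int :=
  if (l.length : Int) = 0 then 0
  else
    ((PySem.List.pyRange 0 ((l.length : Int) - 1) 1).foldl
      (fun (s : Int × Int) (i : Int) =>
        let conta : Int :=
          if (PySem.List.pyGetD l i ((0:Int),(0:Int))).2 == (PySem.List.pyGetD l (i+1) ((0:Int),(0:Int))).1
          then s.1 + 1 else 1
        (conta, if conta > s.2 then conta else s.2))
      (1, 1)).2

-- ===== PORT B =====
def Ex1_alt (l : List (Int × Int)) : Int :=
  if (l.length : Int) = 0 then 0
  else
    let n : Int := l.length
    let breaks : List Int := (PySem.List.pyRange 0 (n - 1) 1).filter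
      (fun i => !((PySem.List.pyGetD l i ((0:Int),(0:Int))).2 == (PySem.List.pyGetD l (i+1) ((0:Int),(0:Int))).1))
    let pts : List Int := [-1] ++ breaks ++ [n - 1]
    ((PySem.List.max? ((PySem.List.pyRange 0 ((pts.length : Int) - 1) 1).map
        (fun j => PySem.List.pyGetD pts (j+1) 0 - PySem.List.pyGetD pts j 0))
      (fun x => x)).getD 0)

-- ===== PRECONDITION & SPEC =====
def Spec_Ex1 (l : List (Int × Int)) (out : Int) : Prop := out = Ex1_alt l
instance (l : List (Int × Int)) (out : Int) : Decidable (Spec_Ex1 l out) := by unfold Spec_Ex1; infer_instance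

-- ===== CLAIM (what is proved, stated in full; the proofs are below) =====
def Claim_equal_Ex1 : Prop := ∀ (l : List (Int × Int)), Dom_Ex1 l → Spec_Ex1 l (Ex1 l)

-- ===== LEMMAS AND PROOFS =====
def fBool (s : Int × Int) (b : Bool) : Int × Int :=
  let c : Int := if b then s.1 + 1 else 1
  (c, if c > s.2 then c else s.2)

def ltr (ms : List Bool) : Int :=
  match h : PySem.List.index? ms false with
  | some k => max (k : Int) (ltr (ms.drop (k+1)))
  | none => (ms.length : Int)
termination_by ms.length
decreasing_by
  have hk := PySem.List.getElem_of_index?_eq_some h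
  obtain ⟨hlt, -, -⟩ := hk
  simp [List.length_drop]; omega

lemma ltr_none {ms : List Bool} (h : PySem.List.index? ms false = none) :
    ltr ms = (ms.length : Int) := by
  rw [ltr, h]

lemma ltr_some {ms : List Bool} {k : Nat} (h : PySem.List.index? ms false = some k) :
    ltr ms = max (k : Int) (ltr (ms.drop (k+1))) := by
  rw [ltr, h]

lemma drop_decomp (pre suf : List Bool) :
    (pre ++ false :: suf).drop (pre.length + 1) = suf := by
  have h1 : pre ++ false :: suf = (pre ++ [false]) ++ suf := by simp
  rw [h1, List.drop_left' (by simp)]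

lemma allTrueFold (ms : List Bool) (hall : ∀ b ∈ ms, b = true) :
    ∀ (c m : Int), c ≤ m → ms.foldl fBool (c, m) = (c + ms.length, max m (c + ms.length)) := by
  induction ms with
  | nil => intro c m h; simp; omega
  | cons b r ih =>
    intro c m h
    have hb : b = true := hall b (by simp)
    subst hb
    have : fBool (c, m) true = (c + 1, max m (c + 1)) := by
      simp [fBool]; omega
    rw [List.foldl_cons, this, ih (fun b hb => hall b (by simp [hb])) (c+1) (max m (c+1)) (by omega)]
    apply Prod.ext <;> (simp; omega)

lemma ltr_nonneg : ∀ (N : Nat) (ms : List Bool), ms.length ≤ N → 0 ≤ ltr ms := by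
  intro N
  induction N with
  | zero =>
    intro ms h
    have : ms = [] := List.eq_nil_of_length_eq_zero (by omega)
    subst this; rw [ltr_none (by simp)]; simp
  | succ n ih =>
    intro ms h
    cases hidx : PySem.List.index? ms false with
    | none => rw [ltr_none hidx]; positivity
    | some k =>
      rw [ltr_some hidx]
      obtain ⟨hlt, -, -⟩ := PySem.List.getElem_of_index?_eq_some hidx
      have := ih (ms.drop (k+1)) (by simp [List.length_drop]; omega)
      omega

lemma index?_none_all_true {ms : List Bool} (h : PySem.List.index? ms false = none) :
    ∀ b ∈ ms, b = true := by
  rw [PySem.List.index?_eq_none_iff] at h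
  intro b hb
  cases b with
  | false => exact absurd hb h
  | true => rfl

lemma CA : ∀ (N : Nat) (ms : List Bool), ms.length ≤ N → ∀ m : Int, 1 ≤ m →
    (ms.foldl fBool (1, m)).2 = max m (1 + ltr ms) := by
  intro N
  induction N with
  | zero =>
    intro ms h m hm
    have : ms = [] := List.eq_nil_of_length_eq_zero (by omega)
    subst this
    rw [ltr_none (by simp)]
    simp
    omega
  | succ n ih =>
    intro ms h m hm
    cases hidx : PySem.List.index? ms false with
    | none =>
      rw [ltr_none hidx,
        allTrueFold ms (index?_none_all_true hidx) 1 m (by omega)]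
    | some k =>
      rw [ltr_some hidx]
      obtain ⟨pre, suf, hdec, hlen, hpre⟩ := (PySem.List.index?_eq_some_iff ms false k).1 hidx
      have hpreall : ∀ b ∈ pre, b = true := by
        intro b hb; cases b with
        | false => exact absurd hb hpre
        | true => rfl
      have hdrop : ms.drop (k+1) = suf := by rw [hdec, ← hlen]; exact drop_decomp pre suf
      have hsuf : suf.length ≤ n := by
        subst hdec; simp at h; omega
      have hnn : 0 ≤ ltr suf := by
        simpa [hdrop] using ltr_nonneg n (ms.drop (k+1)) (by rw [hdrop]; exact hsuf)
      rw [hdec, List.foldl_append, allTrueFold pre hpreall 1 m (by omega), List.foldl_cons]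
      have hstep : fBool (1 + (pre.length:Int), max m (1 + pre.length)) false
          = (1, max m (1 + pre.length)) := by
        simp [fBool]
      rw [hstep, ih suf hsuf (max m (1 + pre.length)) (by omega),
        ← hlen, drop_decomp, hlen]
      omega

def fps : List Bool → List Nat
  | [] => []
  | b :: r => if b then (fps r).map (· + 1) else 0 :: (fps r).map (· + 1)

def diffs : Int → List Int → List Int
  | _, [] => []
  | p, q :: r => (q - p) :: diffs q r

def mx : List Int → Int
  | [] => 0
  | x :: t => t.foldl max x

def mgap (ms : List Bool) : Int :=
  mx (diffs (-1) ((fps ms).map (fun k : Nat => (k : Int)) ++ [(ms.length : Int)]))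

lemma fm (t : List Int) : ∀ a b : Int, t.foldl max (max a b) = max a (t.foldl max b) := by
  induction t with
  | nil => intro a b; simp [List.foldl]
  | cons c r ih =>
    intro a b
    simp only [List.foldl_cons, max_assoc, ih]

lemma mx_cons (a : Int) (l : List Int) (h : l ≠ []) : mx (a :: l) = max a (mx l) := by
  cases l with
  | nil => exact absurd rfl h
  | cons b t => simp [mx, fm]

lemma diffs_shift (ys : List Int) : ∀ p c : Int, diffs (p + c) (ys.map (· + c)) = diffs p ys := by
  induction ys with
  | nil => intro p c; simp [diffs]
  | cons q r ih =>
    intro p c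
    simp only [List.map_cons, diffs, ih]
    congr 1
    ring

lemma fps_nil_of_all_true (ms : List Bool) (h : ∀ b ∈ ms, b = true) : fps ms = [] := by
  induction ms with
  | nil => rfl
  | cons b r ih =>
    have hb := h b (by simp)
    subst hb
    simp [fps, ih (fun b hb => h b (by simp [hb]))]

lemma fps_append_all_true (pre : List Bool) : ∀ (x : List Bool), (∀ b ∈ pre, b = true) →
    fps (pre ++ x) = (fps x).map (· + pre.length) := by
  induction pre with
  | nil => intro x _; simp
  | cons b r ih =>
    intro x h
    have hb := h b (by simp)
    subst hb
    simp only [List.cons_append, fps, if_true, ih x (fun b hb => h b (by simp [hb])),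
      List.map_map]
    apply List.map_congr_left
    intro a _
    simp [Function.comp]
    omega

lemma CB : ∀ (N : Nat) (ms : List Bool), ms.length ≤ N → mgap ms = 1 + ltr ms := by
  intro N
  induction N with
  | zero =>
    intro ms h
    have : ms = [] := List.eq_nil_of_length_eq_zero (by omega)
    subst this
    rw [ltr_none (by simp)]
    simp [mgap, fps, diffs, mx]
  | succ n ih =>
    intro ms h
    cases hidx : PySem.List.index? ms false with
    | none =>
      rw [ltr_none hidx, mgap,
        fps_nil_of_all_true ms (index?_none_all_true hidx)]
      simp [diffs, mx]
      omega
    | some k =>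
      rw [ltr_some hidx]
      obtain ⟨pre, suf, hdec, hlen, hpre⟩ := (PySem.List.index?_eq_some_iff ms false k).1 hidx
      have hpreall : ∀ b ∈ pre, b = true := by
        intro b hb; cases b with
        | false => exact absurd hb hpre
        | true => rfl
      have hdrop : ms.drop (k+1) = suf := by rw [hdec, ← hlen]; exact drop_decomp pre suf
      have hsuf : suf.length ≤ n := by
        subst hdec; simp at h; omega
      have hnn : 0 ≤ ltr suf := by
        simpa [hdrop] using ltr_nonneg n (ms.drop (k+1)) (by rw [hdrop]; exact hsuf)
      have hfps : fps ms = k :: (fps suf).map (· + (k + 1)) := by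
        rw [hdec, fps_append_all_true pre (false :: suf) hpreall, hlen]
        simp [fps, List.map_map]
        intro a _
        omega
      have hlenms : (ms.length : Int) = (suf.length : Int) + ((k : Int) + 1) := by
        subst hdec; simp; omega
      -- rewrite the list inside mgap into shifted form
      have hlist : (fps ms).map (fun j : Nat => (j : Int)) ++ [(ms.length : Int)]
          = (k : Int) :: (((fps suf).map (fun j : Nat => (j : Int)) ++ [(suf.length : Int)]).map (· + ((k : Int) + 1))) := by
        rw [hfps]
        simp [List.map_map, Function.comp, hlenms]
      have hne : ((fps suf).map (fun j : Nat => (j : Int)) ++ [(suf.length : Int)]) ≠ [] := by simp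
      obtain ⟨z, zs, hz⟩ := List.exists_cons_of_ne_nil hne
      rw [mgap, hlist, diffs]
      have hshift : diffs (k : Int) ((((fps suf).map (fun j : Nat => (j : Int)) ++ [(suf.length : Int)])).map (· + ((k : Int) + 1)))
          = diffs (-1) ((fps suf).map (fun j : Nat => (j : Int)) ++ [(suf.length : Int)]) := by
        have := diffs_shift ((fps suf).map (fun j : Nat => (j : Int)) ++ [(suf.length : Int)]) (-1) ((k : Int) + 1)
        simpa using this
      rw [hshift]
      have hdne : diffs (-1) ((fps suf).map (fun j : Nat => (j : Int)) ++ [(suf.length : Int)]) ≠ [] := by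
        rw [hz, diffs]; simp
      rw [mx_cons _ _ hdne]
      have hmg : mx (diffs (-1) ((fps suf).map (fun j : Nat => (j : Int)) ++ [(suf.length : Int)])) = 1 + ltr suf := by
        have := ih suf hsuf
        rw [mgap] at this
        exact this
      rw [hmg, hdrop]
      omega

def links (l : List (Int × Int)) : List Bool :=
  (l.zip l.tail).map (fun p => p.1.2 == p.2.1)

lemma pyRange_cast (m : Nat) :
    PySem.List.pyRange 0 (m : Int) 1 = (List.range m).map (fun k : Nat => (k : Int)) := by
  rw [PySem.List.pyRange_one]
  simp

lemma mapAdj {α β : Type} (xs : List α) (d : α) (g : α → α → β) :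
    (List.range (xs.length - 1)).map (fun k => g (xs.getD k d) (xs.getD (k+1) d))
      = (xs.zip xs.tail).map (fun p => g p.1 p.2) := by
  apply List.ext_getElem
  · simp
  · intro i h1 h2
    simp only [List.getElem_map, List.getElem_range, List.getElem_zip, List.getElem_tail]
    have hi : i < xs.length - 1 := by simpa using h1
    rw [List.getD_eq_getElem xs d (by omega), List.getD_eq_getElem xs d (by omega)]

lemma links_length (l : List (Int × Int)) (h : l ≠ []) :
    (links l).length = l.length - 1 := by
  cases l with
  | nil => exact absurd rfl h
  | cons a t => simp [links]

lemma zipTailDiffs : ∀ (xs : List Int) (p : Int),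
    (((p :: xs).zip xs).map (fun q : Int × Int => q.2 - q.1)) = diffs p xs := by
  intro xs
  induction xs with
  | nil => intro p; simp [diffs]
  | cons q r ih => intro p; simp [diffs, ih]

lemma mxeq (xs : List Int) : (PySem.List.max? xs (fun x => x)).getD 0 = mx xs := by
  cases xs with
  | nil => simp [PySem.List.max?, mx]
  | cons x t => rw [PySem.List.max?_id_cons]; simp [mx]

lemma filter_range_fps : ∀ (ms : List Bool),
    (List.range ms.length).filter (fun k => !(ms.getD k true)) = fps ms := by
  intro ms
  induction ms with
  | nil => simp [fps]
  | cons b r ih =>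
    simp only [List.length_cons, List.range_succ_eq_map, List.filter_cons]
    rw [List.filter_map]
    cases b with
    | false =>
      simp only [fps]
      simp
      rw [List.filter_congr (fun k _ => by simp : ∀ k ∈ List.range r.length,
        ((fun k => !(false :: r)[k]?.getD true) ∘ Nat.succ) k = (fun k => !r.getD k true) k), ih]
    | true =>
      simp only [fps]
      simp
      rw [List.filter_congr (fun k _ => by simp : ∀ k ∈ List.range r.length,
        ((fun k => !(true :: r)[k]?.getD true) ∘ Nat.succ) k = (fun k => !r.getD k true) k), ih]

lemma castsucc (k : Nat) : ((k : Int) + 1) = ((k + 1 : Nat) : Int) := by push_cast; ring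

lemma exA (l : List (Int × Int)) (h : l ≠ []) :
    Ex1 l = ((links l).foldl fBool (1, 1)).2 := by
  have hlen : 1 ≤ l.length := List.length_pos_iff.2 h
  rw [Ex1, if_neg (by omega)]
  have hm : ((l.length : Int) - 1) = ((l.length - 1 : Nat) : Int) := by omega
  rw [hm, pyRange_cast, List.foldl_map]
  have hbody : (fun (s : Int × Int) (k : Nat) =>
      (fun (s : Int × Int) (i : Int) =>
        let conta : Int :=
          if (PySem.List.pyGetD l i ((0:Int),(0:Int))).2 == (PySem.List.pyGetD l (i+1) ((0:Int),(0:Int))).1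
          then s.1 + 1 else 1
        (conta, if conta > s.2 then conta else s.2)) s ((k : Int)))
      = fun (s : Int × Int) (k : Nat) =>
        fBool s ((l.getD k ((0:Int),(0:Int))).2 == (l.getD (k+1) ((0:Int),(0:Int))).1) := by
    funext s k
    simp only [castsucc, PySem.List.pyGetD_natCast]
    simp [fBool]
  rw [hbody, ← List.foldl_map, mapAdj l ((0:Int),(0:Int)) (fun a b => a.2 == b.1)]
  rfl

lemma links_getD (l : List (Int × Int)) (k : Nat) (hk : k < l.length - 1) :
    (links l).getD k true = ((l.getD k ((0:Int),(0:Int))).2 == (l.getD (k+1) ((0:Int),(0:Int))).1) := by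
  have hadj := mapAdj l ((0:Int),(0:Int)) (fun a b => a.2 == b.1)
  rw [links, ← hadj, List.getD_eq_getElem _ _ (by simpa using hk)]
  simp only [List.getElem_map, List.getElem_range]

lemma mapAdjSub (xs : List Int) :
    (List.range (xs.length - 1)).map (fun k => xs.getD (k+1) 0 - xs.getD k 0)
      = (xs.zip xs.tail).map (fun p => p.2 - p.1) :=
  mapAdj xs 0 (fun a b => b - a)

lemma exB (l : List (Int × Int)) (h : l ≠ []) :
    Ex1_alt l = mgap (links l) := by
  have hlen : 1 ≤ l.length := List.length_pos_iff.2 h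
  have hll : (links l).length = l.length - 1 := links_length l h
  rw [Ex1_alt, if_neg (by omega)]
  have hm : ((l.length : Int) - 1) = ((l.length - 1 : Nat) : Int) := by omega
  simp only [hm, pyRange_cast, List.filter_map]
  -- identify breaks with fps (links l)
  have hfilter : (List.range (l.length - 1)).filter
      ((fun i : Int => !((PySem.List.pyGetD l i ((0:Int),(0:Int))).2 == (PySem.List.pyGetD l (i+1) ((0:Int),(0:Int))).1)) ∘ (fun k : Nat => (k : Int)))
      = fps (links l) := by
    rw [← filter_range_fps (links l), hll]
    apply List.filter_congr
    intro k hk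
    have hk' : k < l.length - 1 := by simpa using hk
    simp only [Function.comp, castsucc, PySem.List.pyGetD_natCast]
    rw [links_getD l k hk']
  rw [hfilter]
  have hc : ((l.length - 1 : Nat) : Int) = (((links l).length : Nat) : Int) := by rw [hll]
  rw [hc]
  set rest := (List.map (fun k : Nat => (k:Int)) (fps (links l)) ++ [(((links l).length : Nat) : Int)]) with hrest
  have hP : [-1] ++ List.map (fun k : Nat => (k:Int)) (fps (links l)) ++ [(((links l).length : Nat) : Int)] = (-1) :: rest := by simp [hrest]
  rw [hP]
  have hplen : ((((-1) :: rest).length : Int) - 1) = ((((-1) :: rest).length - 1 : Nat) : Int) := by simp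
  rw [hplen, pyRange_cast, List.map_map]
  have hbody : ((fun j : Int => PySem.List.pyGetD ((-1) :: rest) (j+1) 0 - PySem.List.pyGetD ((-1) :: rest) j 0) ∘ (fun k : Nat => (k:Int)))
      = fun k : Nat => ((-1) :: rest).getD (k+1) 0 - ((-1) :: rest).getD k 0 := by
    funext k
    simp only [Function.comp, castsucc, PySem.List.pyGetD_natCast]
  rw [hbody, mxeq, mgap, ← zipTailDiffs rest (-1)]
  exact congrArg mx (mapAdjSub ((-1) :: rest))

lemma main_eq (l : List (Int × Int)) : Ex1 l = Ex1_alt l := by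
  by_cases h : l = []
  · subst h; rfl
  · rw [exA l h, exB l h,
      CA (links l).length (links l) le_rfl 1 le_rfl,
      CB (links l).length (links l) le_rfl]
    have := ltr_nonneg (links l).length (links l) le_rfl
    omega

-- ===== VERDICT (by name: the statement is the Claim_ definition above) =====
theorem Ex1_spec : Claim_equal_Ex1 := by
  intro l _
  unfold Spec_Ex1
  exact main_eq l
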